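-- pv_equiv track=rewrite | github.com/GPaolo/STAX | analysis/phylogenetic_analysis.py | find_unique_lins
-- ===== SOURCE A (Python) =====
-- def find_unique_lins(lineages):
--   """
--   This function removes lineages that are not complete, so to have only unique lins
--   :param lineages:
--   :return:
--   """
--   for agent in lineages:
--     lins = lineages[agent]
--     lins.sort(key=len)
--     i = 0
--     while i < len(lins):
--       for j in range(i+1, len(lins)):
--         if all(elem in lins[j] for elem in lins[i]):
--           del lins[i]
--           i = -1
--           break
--       i += 1
--     lineages[agent] = lins
--   return lineages
-- ===== SOURCE B (Python) =====
-- def find_unique_lins(lineages):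
--   """
--   Keep, per agent, only the lineages that are not contained in a later
--   (length-sorted) lineage: one pass over the sorted list, no restart logic.
--   """
--   result = {}
--   for agent, lins in lineages.items():
--     lins = sorted(lins, key=len)
--     result[agent] = [lin for i, lin in enumerate(lins)
--                      if not any(set(lin) <= set(big) for big in lins[i + 1:])]
--   return result
-- ===== Notes on version B (the rewrite author's own statement) =====
-- stated objective: simpler
-- what changed: A's while-loop deletes a dominated lineage in place and restarts the whole scan from index 0 after every deletion; B replaces that with a single comprehension over the length-sorted list that keeps exactly the lineages with no superset among the later entries (subset tested with sets), which is equivalent by transitivity of set inclusion.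
import Mathlib
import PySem

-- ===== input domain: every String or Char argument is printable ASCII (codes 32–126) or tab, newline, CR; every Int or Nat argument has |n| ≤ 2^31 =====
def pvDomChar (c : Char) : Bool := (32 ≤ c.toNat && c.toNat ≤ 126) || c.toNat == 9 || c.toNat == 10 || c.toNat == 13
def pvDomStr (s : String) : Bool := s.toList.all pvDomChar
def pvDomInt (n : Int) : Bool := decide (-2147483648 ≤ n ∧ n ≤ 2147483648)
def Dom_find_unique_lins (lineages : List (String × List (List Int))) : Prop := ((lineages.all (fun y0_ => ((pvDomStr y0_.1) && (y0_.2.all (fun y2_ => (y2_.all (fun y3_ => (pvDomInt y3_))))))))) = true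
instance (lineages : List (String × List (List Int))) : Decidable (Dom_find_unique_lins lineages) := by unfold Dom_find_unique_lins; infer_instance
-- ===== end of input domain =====

-- B removes each lineage that has a later superset in the length-sorted list in ONE
-- pass (A restarts its scan from 0 after every deletion); A also mutates its
-- argument in place (sort + del), B builds a fresh dict — the equivalence proved
-- here is about the RETURN value only.

-- ===== PORT A =====
-- inner 'for j in range(i+1, len(lins)): if all(elem in lins[j] for elem in lins[i])'
-- (Nat indices are exact here: every index used is nonnegative and in range)
def pvInnerA (l : List (List Int)) (i : Nat) : Bool :=
  (List.range' (i + 1) (l.length - (i + 1))).any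
    (fun j => (l.getD i []).all (fun elem => (l.getD j []).contains elem))

-- the 'while i < len(lins)' loop with 'del lins[i]; i = -1; break' restart
def pvLoopA (l : List (List Int)) (i : Nat) : List (List Int) :=
  if _h : i < l.length then
    if pvInnerA l i then
      pvLoopA (l.eraseIdx i) 0
    else
      pvLoopA l (i + 1)
  else l
termination_by (l.length, l.length - i)
decreasing_by
  · have := List.length_eraseIdx_of_lt _h
    exact Prod.Lex.left _ _ (by omega)
  · exact Prod.Lex.right _ (by omega)

def find_unique_lins (lineages : List (String × List (List Int))) : List (String × List (List Int)) :=
  (PySem.Dict.ofList lineages).items.map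
    (fun p => (p.1, pvLoopA (PySem.List.sorted p.2 (fun x => (x.length : Int)) false) 0))

-- ===== PORT B =====
-- '[lin for i, lin in enumerate(lins) if not any(set(lin) <= set(big) for big in lins[i+1:])]'
def pvKeepB (s : List (List Int)) : List (List Int) :=
  (PySem.List.enumerate s 0).filterMap
    (fun p =>
      if (PySem.List.slice s (some (p.1 + 1)) none).any
           (fun big => PySem.Set.issubset (PySem.Set.ofList p.2) (PySem.Set.ofList big)) then
        none
      else some p.2)

def find_unique_lins_alt (lineages : List (String × List (List Int))) : List (String × List (List Int)) :=
  (PySem.Dict.ofList lineages).items.map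
    (fun p => (p.1, pvKeepB (PySem.List.sorted p.2 (fun x => (x.length : Int)) false)))

-- ===== PRECONDITION & SPEC =====
def Spec_find_unique_lins (lineages : List (String × List (List Int))) (out : List (String × List (List Int))) : Prop := out = find_unique_lins_alt lineages
instance (lineages : List (String × List (List Int))) (out : List (String × List (List Int))) : Decidable (Spec_find_unique_lins lineages out) := by unfold Spec_find_unique_lins; infer_instance

-- ===== CLAIM (what is proved, stated in full; the proofs are below) =====
def Claim_equal_find_unique_lins : Prop := ∀ (lineages : List (String × List (List Int))), Dom_find_unique_lins lineages → Spec_find_unique_lins lineages (find_unique_lins lineages)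

-- ===== LEMMAS AND PROOFS =====

-- 'x is contained (as a set) in some element of ys'
def pvBad (x : List Int) (ys : List (List Int)) : Bool :=
  ys.any (fun y => x.all (fun elem => y.contains elem))

-- structural single-pass filter: the common reference form of both programs
def pvKeep : List (List Int) → List (List Int)
  | [] => []
  | x :: rest => if pvBad x rest then pvKeep rest else x :: pvKeep rest

-- set(x) <= set(y) is the element-wise membership test A writes out
theorem pv_sub_eq (x y : List Int) :
    PySem.Set.issubset (PySem.Set.ofList x) (PySem.Set.ofList y)
      = x.all (fun elem => y.contains elem) := by
  by_cases h : ∀ e ∈ x, e ∈ y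
  · have h1 : PySem.Set.issubset (PySem.Set.ofList x) (PySem.Set.ofList y) = true := by
      rw [PySem.Set.issubset_iff]
      intro e he; rw [PySem.Set.mem_ofList] at he ⊢; exact h e he
    have h2 : x.all (fun elem => y.contains elem) = true := by
      simp only [List.all_eq_true, List.contains_iff_mem]; exact h
    rw [h1, h2]
  · have h1 : PySem.Set.issubset (PySem.Set.ofList x) (PySem.Set.ofList y) = false := by
      rw [Bool.eq_false_iff]
      intro hc; rw [PySem.Set.issubset_iff] at hc
      apply h; intro e he
      have := hc e ((PySem.Set.mem_ofList _ _).mpr he)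
      rwa [PySem.Set.mem_ofList] at this
    have h2 : x.all (fun elem => y.contains elem) = false := by
      rw [Bool.eq_false_iff]
      intro hc; simp only [List.all_eq_true, List.contains_iff_mem] at hc
      exact h hc
    rw [h1, h2]

-- ---- B side: the enumerate/slice comprehension is pvKeep ----
theorem pvKeepB_aux (s : List (List Int)) :
    ∀ (t : List (List Int)) (k : Nat), s.drop k = t →
    (PySem.List.enumerate t (k : Int)).filterMap
      (fun p =>
        if (PySem.List.slice s (some (p.1 + 1)) none).any
             (fun big => PySem.Set.issubset (PySem.Set.ofList p.2) (PySem.Set.ofList big)) then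
          none
        else some p.2) = pvKeep t := by
  intro t
  induction t with
  | nil => intro k _; rfl
  | cons x rest ih =>
    intro k hk
    have hrest : s.drop (k + 1) = rest := by
      have h1 : List.drop (k + 1) s = List.drop 1 (List.drop k s) := by
        rw [List.drop_drop]
      rw [h1, hk, List.drop_one, List.tail_cons]
    have hcast : (k : Int) + 1 = ((k + 1 : Nat) : Int) := by push_cast; ring
    rw [PySem.List.enumerate_cons, List.filterMap_cons]
    have hcond : (PySem.List.slice s (some (((k + 1 : Nat) : Int))) none).any
        (fun big => PySem.Set.issubset (PySem.Set.ofList x) (PySem.Set.ofList big))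
        = pvBad x rest := by
      rw [PySem.List.slice_from_natCast, hrest]
      simp only [pv_sub_eq, pvBad]
    simp only [hcast]
    rw [hcond]
    have hredT : ∀ {α : Type} (a b : α), (if true = true then a else b) = a :=
      fun a b => if_pos rfl
    have hredF : ∀ {α : Type} (a b : α), (if false = true then a else b) = b :=
      fun a b => if_neg (by simp)
    conv_rhs => rw [pvKeep]
    by_cases hb : pvBad x rest = true
    · rw [hb, hredT, hredT]
      exact ih (k + 1) hrest
    · rw [Bool.not_eq_true] at hb
      rw [hb, hredF, hredF]
      show x :: _ = x :: pvKeep rest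
      rw [ih (k + 1) hrest]

theorem pvKeepB_eq_pvKeep (s : List (List Int)) : pvKeepB s = pvKeep s := by
  have := pvKeepB_aux s s 0 (by simp)
  simpa [pvKeepB] using this

-- ---- A side ----

-- the inner for-loop tests pvBad of the suffix
theorem pv_any_range'_getD {α : Type} (f : α → Bool) (d : α) :
    ∀ (l : List α) (i : Nat),
      (List.range' i (l.length - i)).any (fun j => f (l.getD j d)) = (l.drop i).any f := by
  intro l i
  induction hn : l.length - i using Nat.strong_induction_on generalizing i with
  | _ n ih =>
    match n, hn with
    | 0, hn =>
      have h1 : l.length ≤ i := by omega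
      rw [List.drop_eq_nil_of_le h1]
      rfl
    | (m + 1), hn =>
      have h1 : i < l.length := by omega
      rw [List.range'_succ, List.drop_eq_getElem_cons h1, List.any_cons, List.any_cons,
        List.getD_eq_getElem l d h1, ih m (by omega) (i + 1) (by omega)]

theorem pvInnerA_eq (l : List (List Int)) (i : Nat) :
    pvInnerA l i = pvBad (l.getD i []) (l.drop (i + 1)) := by
  unfold pvInnerA pvBad
  exact pv_any_range'_getD (fun y => (l.getD i []).all (fun elem => y.contains elem)) [] l (i + 1)

-- membership facts about eraseIdx
theorem pv_sub_trans {x y z : List Int}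
    (h1 : x.all (fun elem => y.contains elem) = true)
    (h2 : y.all (fun elem => z.contains elem) = true) :
    x.all (fun elem => z.contains elem) = true := by
  simp only [List.all_eq_true, List.contains_iff_mem] at h1 h2 ⊢
  exact fun e he => h2 _ (h1 e he)

theorem pv_mem_drop_eraseIdx {α : Type} (l : List α) (i : Nat) {y : α}
    (h : y ∈ l.drop (i + 1)) : y ∈ l.eraseIdx i := by
  rw [List.eraseIdx_eq_take_drop_succ]
  exact List.mem_append_right _ h

theorem pv_mem_eraseIdx_or {α : Type} (l : List α) (i : Nat) (h : i < l.length) {y : α}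
    (hy : y ∈ l) : y ∈ l.eraseIdx i ∨ y = l[i] := by
  rw [List.eraseIdx_eq_take_drop_succ]
  conv at hy => rw [← List.take_append_drop i l, List.drop_eq_getElem_cons h]
  rcases List.mem_append.mp hy with h1 | h2
  · exact Or.inl (List.mem_append_left _ h1)
  · rcases List.mem_cons.mp h2 with h3 | h4
    · exact Or.inr h3
    · exact Or.inl (List.mem_append_right _ h4)

-- pvBad is stable under erasing an element that itself has a later superset
theorem pv_bad_erase (x : List Int) (rest : List (List Int)) (i : Nat) (h : i < rest.length)
    (hbad : pvBad rest[i] (rest.drop (i + 1)) = true) :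
    pvBad x (rest.eraseIdx i) = pvBad x rest := by
  by_cases hr : pvBad x rest = true
  · rw [hr]
    simp only [pvBad, List.any_eq_true] at hr hbad ⊢
    obtain ⟨y, hy, hsub⟩ := hr
    rcases pv_mem_eraseIdx_or rest i h hy with hmem | heq
    · exact ⟨y, hmem, hsub⟩
    · obtain ⟨z, hz, hsubz⟩ := hbad
      exact ⟨z, pv_mem_drop_eraseIdx rest i hz, pv_sub_trans (heq ▸ hsub) hsubz⟩
  · have h2 : pvBad x (rest.eraseIdx i) = false := by
      rw [Bool.eq_false_iff]
      intro hc
      apply hr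
      simp only [pvBad, List.any_eq_true] at hc ⊢
      obtain ⟨y, hy, hsub⟩ := hc
      exact ⟨y, List.mem_of_mem_eraseIdx hy, hsub⟩
    rw [h2]
    exact (Bool.eq_false_iff.mpr hr).symm

-- erasing an element with a later superset does not change pvKeep
theorem pv_keep_erase :
    ∀ (l : List (List Int)) (i : Nat) (h : i < l.length),
      pvBad (l[i]'h) (l.drop (i + 1)) = true → pvKeep (l.eraseIdx i) = pvKeep l := by
  intro l
  induction l with
  | nil => intro i h; simp at h
  | cons x rest ih =>
    intro i h hbad
    cases i with
    | zero =>
      have hb : pvBad x rest = true := by simpa using hbad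
      rw [List.eraseIdx_cons_zero]
      conv_rhs => rw [pvKeep]
      rw [hb]
      simp
    | succ i =>
      have h' : i < rest.length := by simpa using h
      have hbad' : pvBad (rest[i]'h') (rest.drop (i + 1)) = true := by
        simpa using hbad
      rw [List.eraseIdx_cons_succ, pvKeep, pvKeep,
        pv_bad_erase x rest i h' hbad', ih i h' hbad']

theorem pv_keep_of_no_bad :
    ∀ (l : List (List Int)), (∀ k, (hk : k < l.length) → pvBad l[k] (l.drop (k + 1)) = false) →
      pvKeep l = l := by
  intro l
  induction l with
  | nil => intro _; rfl
  | cons x rest ih =>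
    intro h
    have h0 : pvBad x rest = false := by simpa using h 0 (by simp)
    rw [pvKeep, h0]
    simp only [Bool.false_eq_true, if_false]
    rw [ih]
    intro k hk
    simpa using h (k + 1) (by simpa using Nat.succ_lt_succ hk)

theorem pvLoopA_eq_pvKeep (l : List (List Int)) (i : Nat)
    (h : ∀ k, (hk : k < l.length) → k < i → pvBad l[k] (l.drop (k + 1)) = false) :
    pvLoopA l i = pvKeep l := by
  rw [pvLoopA]
  by_cases hlt : i < l.length
  · rw [dif_pos hlt, pvInnerA_eq, List.getD_eq_getElem l [] hlt]
    by_cases hb : pvBad (l[i]'hlt) (l.drop (i + 1)) = true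
    · rw [if_pos hb,
        pvLoopA_eq_pvKeep (l.eraseIdx i) 0 (fun k hk hk0 => absurd hk0 (by omega))]
      exact pv_keep_erase l i hlt hb
    · rw [if_neg hb]
      apply pvLoopA_eq_pvKeep l (i + 1)
      intro k hk hki
      by_cases hkilt : k < i
      · exact h k hk hkilt
      · have : k = i := by omega
        subst this
        exact Bool.not_eq_true _ |>.mp hb
  · rw [dif_neg hlt]
    exact (pv_keep_of_no_bad l (fun k hk => h k hk (by omega))).symm
termination_by (l.length, l.length - i)
decreasing_by
  · have := List.length_eraseIdx_of_lt hlt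
    exact Prod.Lex.left _ _ (by omega)
  · exact Prod.Lex.right _ (by omega)

-- ===== VERDICT (by name: the statement is the Claim_ definition above) =====
theorem find_unique_lins_spec : Claim_equal_find_unique_lins := by
  intro lineages _
  unfold Spec_find_unique_lins find_unique_lins find_unique_lins_alt
  apply List.map_congr_left
  intro p _
  have h1 : pvLoopA (PySem.List.sorted p.2 (fun x => (x.length : Int)) false) 0 = pvKeep _ :=
    pvLoopA_eq_pvKeep _ 0 (by omega)
  rw [h1, ← pvKeepB_eq_pvKeep]
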